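-- pv_equiv track=rewrite | github.com/aisquad/selae | selae19.py | get_repeated_unities
-- ===== SOURCE A (Python) =====
-- def get_repeated_unities(numbers):
--     repeated = []
--     for unity in range(10):
--         indexes = [numbers.index(u) for u in numbers if u % 10 == unity]
--         if len(indexes) > 1:
--             t = []
--             for i in indexes:
--                 t.append(numbers[i])
--             repeated.append(tuple(t))
--     return repeated
-- ===== SOURCE B (Python) =====
-- def get_repeated_unities(numbers):
--     buckets = {}
--     for x in numbers:
--         buckets.setdefault(x % 10, []).append(x)
--     repeated = []
--     for d in range(10):
--         g = buckets.get(d, [])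
--         if len(g) > 1:
--             repeated.append(tuple(g))
--     return repeated
-- ===== Notes on version B (the rewrite author's own statement) =====
-- stated objective: faster
-- what changed: B makes one pass bucketing numbers into a dict keyed by x % 10 and then emits the buckets of size > 1 for digits 0..9, instead of A's per-digit scans with a quadratic numbers.index lookup per element.
import Mathlib
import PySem

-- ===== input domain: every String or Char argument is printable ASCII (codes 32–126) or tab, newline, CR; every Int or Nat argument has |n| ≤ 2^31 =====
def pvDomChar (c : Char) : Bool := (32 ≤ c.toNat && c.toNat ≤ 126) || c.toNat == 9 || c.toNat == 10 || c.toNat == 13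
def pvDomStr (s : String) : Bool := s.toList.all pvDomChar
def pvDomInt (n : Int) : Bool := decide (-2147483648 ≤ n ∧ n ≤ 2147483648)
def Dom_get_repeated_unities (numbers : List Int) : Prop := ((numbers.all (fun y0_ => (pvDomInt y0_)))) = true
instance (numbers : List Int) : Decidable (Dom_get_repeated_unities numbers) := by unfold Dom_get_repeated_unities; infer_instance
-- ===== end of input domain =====

-- B replaces A's per-digit scans (with a numbers.index lookup for every element) by a single
-- bucketing pass over the list; objective: faster (asymptotically, O(n) vs O(n^2)).

-- ===== PORT A =====
-- numbers.index(u) never raises here since u ∈ numbers; the .getD 0 default is unreachable.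
def get_repeated_unities (numbers : List Int) : List (List Int) :=
  (PySem.List.pyRange 0 10 1).foldl (fun repeated unity =>
    let indexes := (numbers.filter (fun u => PySem.Int.mod u 10 == unity)).map
      (fun u => ((PySem.List.index? numbers u).getD 0 : Int))
    if indexes.length > 1 then
      let t := indexes.foldl (fun t i => t ++ [PySem.List.pyGetD numbers i 0]) []
      repeated ++ [t]
    else repeated) []

-- ===== PORT B =====
def get_repeated_unities_alt (numbers : List Int) : List (List Int) :=
  let buckets : PySem.Dict Int (List Int) :=
    numbers.foldl (fun b x => b.modify (PySem.Int.mod x 10) [] (fun g => g ++ [x]))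
      PySem.Dict.empty
  (PySem.List.pyRange 0 10 1).foldl (fun repeated d =>
    let g := buckets.getD d []
    if g.length > 1 then repeated ++ [g] else repeated) []

-- ===== PRECONDITION & SPEC =====
def Spec_get_repeated_unities (numbers : List Int) (out : List (List Int)) : Prop := out = get_repeated_unities_alt numbers
instance (numbers : List Int) (out : List (List Int)) : Decidable (Spec_get_repeated_unities numbers out) := by unfold Spec_get_repeated_unities; infer_instance

-- ===== CLAIM (what is proved, stated in full; the proofs are below) =====
def Claim_equal_get_repeated_unities : Prop := ∀ (numbers : List Int), Dom_get_repeated_unities numbers → Spec_get_repeated_unities numbers (get_repeated_unities numbers)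

-- ===== LEMMAS AND PROOFS =====

-- numbers[numbers.index(u)] = u for u ∈ numbers
theorem pyGetD_index_getD (numbers : List Int) (u : Int) (hu : u ∈ numbers) :
    PySem.List.pyGetD numbers ((PySem.List.index? numbers u).getD 0 : Int) 0 = u := by
  obtain ⟨k, hk⟩ := Option.isSome_iff_exists.mp ((PySem.List.index?_isSome_iff numbers u).mpr hu)
  obtain ⟨hlt, hval, -⟩ := PySem.List.getElem_of_index?_eq_some hk
  rw [hk]
  simp only [Option.getD_some, PySem.List.pyGetD_natCast]
  rw [List.getD_eq_getElem _ _ hlt, hval]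

-- A's per-digit group collapses to a plain filter
theorem groupA_eq_filter (numbers : List Int) (unity : Int) :
    ((numbers.filter (fun u => PySem.Int.mod u 10 == unity)).map
      (fun u => ((PySem.List.index? numbers u).getD 0 : Int))).foldl
        (fun t i => t ++ [PySem.List.pyGetD numbers i 0]) []
      = numbers.filter (fun u => PySem.Int.mod u 10 == unity) := by
  rw [PySem.List.foldl_append_singleton_eq_map, List.map_map, List.nil_append]
  conv_rhs => rw [← List.map_id (numbers.filter (fun u => PySem.Int.mod u 10 == unity))]
  refine List.map_congr_left (fun u hu => ?_)
  exact pyGetD_index_getD numbers u (List.mem_of_mem_filter hu)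

-- the bucket for digit d holds exactly the elements with that last digit, in order
theorem bucket_getD (numbers : List Int) (b : PySem.Dict Int (List Int)) (d : Int) :
    (numbers.foldl (fun b x => b.modify (PySem.Int.mod x 10) [] (fun g => g ++ [x])) b).getD d []
      = b.getD d [] ++ numbers.filter (fun u => PySem.Int.mod u 10 == d) := by
  induction numbers generalizing b with
  | nil => simp
  | cons x xs ih =>
    simp only [List.foldl_cons, List.filter_cons, ih]
    by_cases h : PySem.Int.mod x 10 = d
    · rw [h, PySem.Dict.getD_modify_self]
      simp [List.append_assoc]
    · rw [PySem.Dict.getD_modify_of_ne _ _ _ (Ne.symm h)]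
      have hb : (PySem.Int.mod x 10 == d) = false := by simpa using h
      rw [hb]
      simp

-- ===== VERDICT (by name: the statement is the Claim_ definition above) =====
theorem get_repeated_unities_spec : Claim_equal_get_repeated_unities := by
  intro numbers _
  unfold Spec_get_repeated_unities get_repeated_unities get_repeated_unities_alt
  simp only [groupA_eq_filter, bucket_getD, PySem.Dict.getD_empty, List.nil_append,
    List.length_map]
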